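-- pv_equiv track=rewrite | github.com/tguinard/zeckendorf | zeck.py | fibindex
-- ===== SOURCE A (Python) =====
-- def fibindex(n):
--     fib0 = 1
--     fib1 = 2
--     count = 0
--     while True:
--         if fib0 > n:
--             return count - 1
--         fib0, fib1 = fib1, fib0 + fib1
--         count += 1
-- ===== SOURCE B (Python) =====
-- _FIBS = []
-- _a, _b = 1, 2
-- while _a <= 2 ** 33:
--     _FIBS.append(_a)
--     _a, _b = _b, _a + _b
--
--
-- def fibindex(n):
--     lo, hi = 0, len(_FIBS)
--     while lo < hi:
--         mid = (lo + hi) // 2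
--         if _FIBS[mid] <= n:
--             lo = mid + 1
--         else:
--             hi = mid
--     return lo - 1
-- ===== Notes on version B (the rewrite author's own statement) =====
-- stated objective: alternative
-- what changed: Replaces A's per-call generate-and-count Fibonacci loop with a one-time precomputed Fibonacci table (covering the 32-bit input domain) queried by a hand-written binary search (bisect_right), so each call does O(log k) comparisons over the static table instead of regenerating the sequence.
import Mathlib
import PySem

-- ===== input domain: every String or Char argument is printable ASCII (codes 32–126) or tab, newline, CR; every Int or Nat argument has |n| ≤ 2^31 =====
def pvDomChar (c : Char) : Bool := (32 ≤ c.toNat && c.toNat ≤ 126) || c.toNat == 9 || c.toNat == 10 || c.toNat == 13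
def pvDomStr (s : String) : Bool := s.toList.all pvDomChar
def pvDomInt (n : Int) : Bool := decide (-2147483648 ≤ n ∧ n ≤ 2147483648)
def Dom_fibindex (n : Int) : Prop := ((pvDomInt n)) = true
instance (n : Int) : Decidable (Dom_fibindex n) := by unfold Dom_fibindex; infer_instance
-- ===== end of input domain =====

-- B replaces A's per-call generate-and-count Fibonacci loop with a Fibonacci table built
-- once (covering the 32-bit input domain) and a hand-written binary search over it.

-- ===== PORT A =====
-- while True: if fib0 > n: return count - 1; fib0, fib1 = fib1, fib0 + fib1; count += 1
-- (the invariant hypotheses 1 ≤ fib0 < fib1 are only for termination)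
def fibLoopA (n fib0 fib1 count : Int) (h1 : 1 ≤ fib0) (h2 : fib0 < fib1) : Int :=
  if fib0 > n then count - 1
  else fibLoopA n fib1 (fib0 + fib1) (count + 1) (by omega) (by omega)
termination_by (n + 1 - fib0).toNat
decreasing_by omega

def fibindex (n : Int) : Int := fibLoopA n 1 2 0 (by norm_num) (by norm_num)

-- ===== PORT B =====
-- module-level: _FIBS = []; _a, _b = 1, 2; while _a <= 2**33: _FIBS.append(_a); _a, _b = _b, _a+_b
-- (the invariant hypotheses 1 ≤ a < b are only for termination)
def buildFibs (cap a b : Int) (h1 : 1 ≤ a) (h2 : a < b) : List Int :=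
  if a ≤ cap then a :: buildFibs cap b (a + b) (by omega) (by omega) else []
termination_by (cap + 1 - a).toNat
decreasing_by omega

def fibsTable : List Int := buildFibs 8589934592 1 2 (by norm_num) (by norm_num)

-- lo, hi = 0, len(_FIBS); while lo < hi: mid = (lo+hi)//2; if _FIBS[mid] <= n: lo = mid+1 else hi = mid
-- (_FIBS[mid] is always in range in these calls; .getD 0 only makes the lookup total)
def bsearchLoop (xs : List Int) (n lo hi : Int) : Int :=
  if lo < hi then
    if (PySem.List.pyGet? xs (PySem.Int.floordiv (lo + hi) 2)).getD 0 ≤ n then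
      bsearchLoop xs n (PySem.Int.floordiv (lo + hi) 2 + 1) hi
    else
      bsearchLoop xs n lo (PySem.Int.floordiv (lo + hi) 2)
  else lo
termination_by (hi - lo).toNat
decreasing_by
  · have h := PySem.Int.floordiv_two_mid_bounds (lo := lo) (hi := hi) (by omega)
    have h2 : PySem.Int.floordiv (lo + hi) 2 < hi := by
      have := PySem.Int.floordiv_lt_iff_lt_mul (a := lo + hi) (b := 2) (q := hi) (by omega)
      omega
    omega
  · have h := PySem.Int.floordiv_two_mid_bounds (lo := lo) (hi := hi) (by omega)
    have h2 : lo < PySem.Int.floordiv (lo + hi) 2 ∨ lo = PySem.Int.floordiv (lo + hi) 2 := by omega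
    have h3 : PySem.Int.floordiv (lo + hi) 2 < hi := by
      have := PySem.Int.floordiv_lt_iff_lt_mul (a := lo + hi) (b := 2) (q := hi) (by omega)
      omega
    omega

def fibindex_alt (n : Int) : Int :=
  bsearchLoop fibsTable n 0 (fibsTable.length : Int) - 1

-- ===== PRECONDITION & SPEC =====
def Spec_fibindex (n : Int) (out : Int) : Prop := out = fibindex_alt n
instance (n : Int) (out : Int) : Decidable (Spec_fibindex n out) := by unfold Spec_fibindex; infer_instance

-- ===== CLAIM (what is proved, stated in full; the proofs are below) =====
def Claim_equal_fibindex : Prop := ∀ (n : Int), Dom_fibindex n → Spec_fibindex n (fibindex n)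

-- ===== LEMMAS AND PROOFS =====

-- element of xs at an Int index (proof-only shorthand)
def elt (xs : List Int) (i : Int) : Int := xs.getD i.toNat 0

theorem mem_buildFibs_lower (k : Nat) : ∀ (cap a b : Int) (h1 : 1 ≤ a) (h2 : a < b),
    (cap + 1 - a).toNat = k → ∀ x ∈ buildFibs cap a b h1 h2, a ≤ x := by
  induction k using Nat.strong_induction_on with
  | _ k ih =>
    intro cap a b h1 h2 hk x hx
    rw [buildFibs] at hx
    by_cases hle : a ≤ cap
    · simp only [hle, if_true, List.mem_cons] at hx
      rcases hx with rfl | hx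
      · omega
      · have := ih (cap + 1 - b).toNat (by omega) cap b (a + b) (by omega) (by omega) rfl x hx
        omega
    · simp [hle] at hx

theorem mem_buildFibs_le_cap (k : Nat) : ∀ (cap a b : Int) (h1 : 1 ≤ a) (h2 : a < b),
    (cap + 1 - a).toNat = k → ∀ x ∈ buildFibs cap a b h1 h2, x ≤ cap := by
  induction k using Nat.strong_induction_on with
  | _ k ih =>
    intro cap a b h1 h2 hk x hx
    rw [buildFibs] at hx
    by_cases hle : a ≤ cap
    · simp only [hle, if_true, List.mem_cons] at hx
      rcases hx with rfl | hx
      · omega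
      · exact ih (cap + 1 - b).toNat (by omega) cap b (a + b) (by omega) (by omega) rfl x hx
    · simp [hle] at hx

-- for n ≤ cap the table splits into the fibs ≤ n followed by values > n
theorem buildFibs_split (k : Nat) : ∀ (n cap a b : Int) (h1 : 1 ≤ a) (h2 : a < b),
    (cap + 1 - a).toNat = k → n ≤ cap →
    ∃ rest, buildFibs cap a b h1 h2 = buildFibs n a b h1 h2 ++ rest ∧ ∀ x ∈ rest, n < x := by
  induction k using Nat.strong_induction_on with
  | _ k ih =>
    intro n cap a b h1 h2 hk hcap
    by_cases hle : a ≤ cap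
    · by_cases hn : a ≤ n
      · obtain ⟨rest, heq, hrest⟩ :=
          ih (cap + 1 - b).toNat (by omega) n cap b (a + b) (by omega) (by omega) rfl hcap
        refine ⟨rest, ?_, hrest⟩
        rw [buildFibs, buildFibs.eq_def (cap := n)]
        simp [hle, hn, heq]
      · refine ⟨buildFibs cap a b h1 h2, ?_, ?_⟩
        · rw [buildFibs.eq_def (cap := n)]
          simp [hn]
        · intro x hx
          have := mem_buildFibs_lower (cap + 1 - a).toNat cap a b h1 h2 rfl x hx
          omega
    · refine ⟨[], ?_, by simp⟩
      rw [buildFibs, buildFibs.eq_def (cap := n)]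
      simp [hle, show ¬ a ≤ n by omega]

-- A's loop counts exactly the elements of buildFibs n a b
theorem fibLoop_eq_len (k : Nat) : ∀ (n a b c : Int) (h1 : 1 ≤ a) (h2 : a < b),
    (n + 1 - a).toNat = k →
    fibLoopA n a b c h1 h2 = c + ((buildFibs n a b h1 h2).length : Int) - 1 := by
  induction k using Nat.strong_induction_on with
  | _ k ih =>
    intro n a b c h1 h2 hk
    rw [fibLoopA, buildFibs]
    by_cases hgt : a > n
    · simp [hgt, show ¬ a ≤ n by omega]
    · have hle : a ≤ n := by omega
      simp only [hgt, if_false, hle, if_true, List.length_cons]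
      rw [ih (n + 1 - b).toNat (by omega) n b (a + b) (c + 1) (by omega) (by omega) rfl]
      push_cast
      ring

-- the binary search splits [lo, hi) at its return value, given monotonicity
theorem bsearch_spec (k : Nat) : ∀ (xs : List Int) (n lo hi : Int),
    (hi - lo).toNat = k → 0 ≤ lo → lo ≤ hi → hi ≤ (xs.length : Int) →
    (∀ i j : Int, 0 ≤ i → i ≤ j → j < (xs.length : Int) → elt xs i ≤ elt xs j) →
    lo ≤ bsearchLoop xs n lo hi ∧ bsearchLoop xs n lo hi ≤ hi ∧
    (∀ i : Int, lo ≤ i → i < bsearchLoop xs n lo hi → elt xs i ≤ n) ∧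
    (∀ i : Int, bsearchLoop xs n lo hi ≤ i → i < hi → n < elt xs i) := by
  induction k using Nat.strong_induction_on with
  | _ k ih =>
    intro xs n lo hi hk h0 hlh hhl hmono
    rw [bsearchLoop]
    by_cases hlt : lo < hi
    · have hmid := PySem.Int.floordiv_two_mid_bounds (lo := lo) (hi := hi) (by omega)
      have hmidhi : PySem.Int.floordiv (lo + hi) 2 < hi := by
        have := PySem.Int.floordiv_lt_iff_lt_mul (a := lo + hi) (b := 2) (q := hi) (by omega)
        omega
      set mid := PySem.Int.floordiv (lo + hi) 2 with hmiddef
      have hmr : 0 ≤ mid ∧ mid < (xs.length : Int) := by omega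
      have hget : (PySem.List.pyGet? xs mid).getD 0 = elt xs mid := by
        rw [PySem.List.pyGet?_eq_some_getElem xs (by omega) (by omega)]
        unfold elt
        rw [List.getD_eq_getElem xs 0 (show mid.toNat < xs.length by omega)]
        rfl
      by_cases hcmp : (PySem.List.pyGet? xs mid).getD 0 ≤ n
      · simp only [hlt, if_true, hcmp]
        obtain ⟨ha, hb, hc, hd⟩ :=
          ih (hi - (mid + 1)).toNat (by omega) xs n (mid + 1) hi rfl (by omega) (by omega) hhl hmono
        refine ⟨by omega, hb, ?_, hd⟩
        intro i hi1 hi2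
        by_cases him : i ≤ mid
        · calc elt xs i ≤ elt xs mid := hmono i mid (by omega) him (by omega)
            _ ≤ n := by rw [← hget]; exact hcmp
        · exact hc i (by omega) hi2
      · simp only [hlt, if_true, hcmp, if_false]
        obtain ⟨ha, hb, hc, hd⟩ :=
          ih (mid - lo).toNat (by omega) xs n lo mid rfl h0 (by omega) (by omega) hmono
        refine ⟨ha, by omega, hc, ?_⟩
        intro i hi1 hi2
        by_cases him : i < mid
        · exact hd i hi1 him
        · calc n < elt xs mid := by rw [← hget]; omega
            _ ≤ elt xs i := hmono mid i (by omega) (by omega) (by omega)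
    · simp only [hlt, if_false]
      refine ⟨le_refl _, by omega, by omega, by omega⟩

-- the table is strictly increasing
theorem buildFibs_pairwise (k : Nat) : ∀ (cap a b : Int) (h1 : 1 ≤ a) (h2 : a < b),
    (cap + 1 - a).toNat = k → List.Pairwise (· < ·) (buildFibs cap a b h1 h2) := by
  induction k using Nat.strong_induction_on with
  | _ k ih =>
    intro cap a b h1 h2 hk
    rw [buildFibs]
    by_cases hle : a ≤ cap
    · simp only [hle, if_true]
      refine List.pairwise_cons.mpr ⟨?_, ih (cap + 1 - b).toNat (by omega) cap b (a + b)
        (by omega) (by omega) rfl⟩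
      intro x hx
      have := mem_buildFibs_lower (cap + 1 - b).toNat cap b (a + b) (by omega) (by omega) rfl x hx
      omega
    · simp [hle]

theorem elt_mono (xs : List Int) (hp : List.Pairwise (· < ·) xs) :
    ∀ i j : Int, 0 ≤ i → i ≤ j → j < (xs.length : Int) → elt xs i ≤ elt xs j := by
  intro i j hi hij hj
  have hij' : i.toNat ≤ j.toNat := by omega
  have hjl : j.toNat < xs.length := by omega
  rcases Nat.lt_or_ge i.toNat j.toNat with h | h
  · have := (List.pairwise_iff_getElem (R := (· < ·)) (l := xs)).mp hp i.toNat j.toNat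
      (by omega) hjl h
    unfold elt
    rw [List.getD_eq_getElem xs 0 (by omega), List.getD_eq_getElem xs 0 hjl]
    omega
  · have : i.toNat = j.toNat := by omega
    simp [elt, this]

theorem elt_append_left (pre rest : List Int) (i : Int) (h0 : 0 ≤ i)
    (h : i < (pre.length : Int)) : elt (pre ++ rest) i = elt pre i := by
  unfold elt
  rw [List.getD_eq_getElem (pre ++ rest) 0 (by simp; omega),
      List.getD_eq_getElem pre 0 (by omega)]
  exact List.getElem_append_left (by omega)

theorem elt_append_right_mem (pre rest : List Int) (i : Int)
    (h1 : (pre.length : Int) ≤ i) (h2 : i < (pre.length : Int) + (rest.length : Int)) :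
    elt (pre ++ rest) i ∈ rest := by
  unfold elt
  rw [List.getD_eq_getElem (pre ++ rest) 0 (by simp; omega)]
  rw [List.getElem_append_right (by omega)]
  exact List.getElem_mem _

-- ===== VERDICT (by name: the statement is the Claim_ definition above) =====
theorem fibindex_spec : Claim_equal_fibindex := by
  intro n hdom
  have hn : n ≤ 8589934592 := by
    unfold Dom_fibindex pvDomInt at hdom
    simp at hdom
    omega
  unfold Spec_fibindex fibindex fibindex_alt
  rw [fibLoop_eq_len (n + 1 - 1).toNat n 1 2 0 (by norm_num) (by norm_num) rfl]
  obtain ⟨rest, heq, hrest⟩ := buildFibs_split ((8589934592:Int) + 1 - 1).toNat n 8589934592 1 2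
    (by norm_num) (by norm_num) rfl hn
  set pref := buildFibs n 1 2 (by norm_num) (by norm_num) with hpref
  set L := (pref.length : Int) with hL
  have hlen : (fibsTable.length : Int) = L + (rest.length : Int) := by
    unfold fibsTable; rw [heq]; push_cast [List.length_append]; ring
  have hmono := elt_mono fibsTable
    (buildFibs_pairwise ((8589934592:Int) + 1 - 1).toNat 8589934592 1 2 (by norm_num) (by norm_num) rfl)
  obtain ⟨ha, hb, hc, hd⟩ := bsearch_spec (fibsTable.length : Int).toNat fibsTable n 0
    (fibsTable.length : Int) (by omega) (by omega) (by positivity) (le_refl _) hmono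
  set r := bsearchLoop fibsTable n 0 (fibsTable.length : Int) with hr
  have hprefle : ∀ i : Int, 0 ≤ i → i < L → elt fibsTable i ≤ n := by
    intro i h0 hiL
    have : elt fibsTable i = elt pref i := by
      unfold fibsTable; rw [heq]; exact elt_append_left pref rest i h0 hiL
    rw [this]
    have hmem : elt pref i ∈ pref := by
      unfold elt
      rw [List.getD_eq_getElem pref 0 (by omega)]
      exact List.getElem_mem _
    exact mem_buildFibs_le_cap (n + 1 - 1).toNat n 1 2 (by norm_num) (by norm_num) rfl _ hmem
  have hrestgt : ∀ i : Int, L ≤ i → i < (fibsTable.length : Int) → n < elt fibsTable i := by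
    intro i hiL hilen
    have hmem : elt fibsTable i ∈ rest := by
      unfold fibsTable; rw [heq]
      exact elt_append_right_mem pref rest i hiL (by omega)
    exact hrest _ hmem
  have hrL : r = L := by
    rcases lt_trichotomy r L with h | h | h
    · have h1 := hd r (le_refl _) (by omega)
      have h2 := hprefle r (by omega) h
      omega
    · exact h
    · have h1 := hc L (by omega) h
      have h2 := hrestgt L (le_refl _) (by omega)
      omega
  omega
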